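-- pv_equiv track=rewrite | github.com/IlgarBaghishov/MPElectroML | mpelectroml/structure_manipulation.py | generate_multiples
-- ===== SOURCE A (Python) =====
-- def generate_multiples(n: int) -> list[list[int]]:
--     """
--     Generates all ordered combinations of three positive integers (a, b, c)
--     such that a * b * c = n. This is used for determining possible supercell
--     transformations.
--
--     Args:
--         n (int): The integer for which to find multiplicative factors.
--                  Must be a positive integer.
--
--     Returns:
--         list[list[int]]: A list of [a, b, c] triplets.
--
--     Raises:
--         ValueError: If n is not a positive integer.
--     """
--     if not isinstance(n, int) or n <= 0:
--         raise ValueError("Input n must be a positive integer for generate_multiples.")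
--
--     results = []
--     for a in range(1, n + 1):
--         if n % a == 0:
--             remaining_n_div_a = n // a
--             for b in range(1, remaining_n_div_a + 1):
--                 if remaining_n_div_a % b == 0:
--                     c = remaining_n_div_a // b
--                     results.append([a, b, c])
--     return results
-- ===== SOURCE B (Python) =====
-- def generate_multiples(n: int) -> list[list[int]]:
--     if not isinstance(n, int) or n <= 0:
--         raise ValueError("Input n must be a positive integer for generate_multiples.")
--
--     def divisors(m):
--         # all divisors of m in increasing order, found in O(sqrt(m))
--         small = []
--         large = []
--         i = 1
--         while i * i <= m:
--             if m % i == 0: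
--                 q = m // i
--                 small.append(i)
--                 if i != q:
--                     large.append(q)
--             i += 1
--         return small + large[::-1]
--
--     return [[a, b, (n // a) // b]
--             for a in divisors(n)
--             for b in divisors(n // a)]
-- ===== Notes on version B (the rewrite author's own statement) =====
-- stated objective: faster
-- what changed: B enumerates divisors by trial division only up to sqrt (collecting each divisor i together with its cofactor m//i) instead of scanning the full range 1..n, and builds the result as a comprehension over divisor lists instead of nested filtered range loops with an accumulator.
import Mathlib
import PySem

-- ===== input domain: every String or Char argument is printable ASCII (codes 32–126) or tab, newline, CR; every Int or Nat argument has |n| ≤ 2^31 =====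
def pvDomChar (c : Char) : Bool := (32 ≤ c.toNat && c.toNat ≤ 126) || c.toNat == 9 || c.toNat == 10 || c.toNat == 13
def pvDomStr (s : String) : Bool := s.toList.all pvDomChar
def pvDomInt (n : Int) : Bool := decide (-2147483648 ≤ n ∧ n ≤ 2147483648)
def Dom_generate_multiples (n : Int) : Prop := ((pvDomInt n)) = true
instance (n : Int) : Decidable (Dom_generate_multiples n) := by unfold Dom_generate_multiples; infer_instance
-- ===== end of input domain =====

-- B enumerates divisors by trial division up to sqrt (divisor + cofactor) instead of
-- scanning the full range 1..n; objective: faster (asymptotic).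


-- ===== PORT A =====
def generate_multiples (n : Int) : List (List Int) :=
  (PySem.List.pyRange 1 (n + 1)).foldl (fun results a =>
    if PySem.Int.mod n a = 0 then
      let remaining_n_div_a := PySem.Int.floordiv n a
      (PySem.List.pyRange 1 (remaining_n_div_a + 1)).foldl (fun results b =>
        if PySem.Int.mod remaining_n_div_a b = 0 then
          results ++ [[a, b, PySem.Int.floordiv remaining_n_div_a b]]
        else results) results
    else results) []

-- ===== PORT B =====
-- the 'while i * i <= m' loop of Source B's divisors helper
def pvDivLoop (m i : Int) (small large : List Int) : List Int :=
  if h : i * i ≤ m then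
    if PySem.Int.mod m i = 0 then
      let q := PySem.Int.floordiv m i
      pvDivLoop m (i + 1) (small ++ [i]) (if i ≠ q then large ++ [q] else large)
    else
      pvDivLoop m (i + 1) small large
  else
    small ++ large.reverse      -- small + large[::-1]
termination_by (m + 1 - i).toNat
decreasing_by
  all_goals
    have hi : i ≤ i * i := by
      by_cases h0 : i ≤ 0
      · exact h0.trans (mul_self_nonneg i)
      · nlinarith
    have : i ≤ m := hi.trans h
    omega

def pvDivisors (m : Int) : List Int := pvDivLoop m 1 [] []

def generate_multiples_alt (n : Int) : List (List Int) :=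
  (pvDivisors n).flatMap (fun a =>
    (pvDivisors (PySem.Int.floordiv n a)).map (fun b =>
      [a, b, PySem.Int.floordiv (PySem.Int.floordiv n a) b]))

-- ===== PRECONDITION & SPEC =====
-- A raises ValueError exactly when n ≤ 0.
def Pre_generate_multiples (n : Int) : Prop := 0 < n
instance (n : Int) : Decidable (Pre_generate_multiples n) := by unfold Pre_generate_multiples; infer_instance
def pvWitness_generate_multiples : Int := (12)
def Spec_generate_multiples (n : Int) (out : List (List Int)) : Prop := out = generate_multiples_alt n
instance (n : Int) (out : List (List Int)) : Decidable (Spec_generate_multiples n out) := by unfold Spec_generate_multiples; infer_instance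

-- ===== CLAIM =====
def Claim_equal_generate_multiples : Prop := ∀ (n : Int), Dom_generate_multiples n → Pre_generate_multiples n → Spec_generate_multiples n (generate_multiples n)

-- ===== LEMMAS AND PROOFS =====

-- the small-divisor part still to be collected from index i on
def pvAmid (m i : Int) : List Int :=
  (PySem.List.pyRange i (m + 1)).filter (fun d => decide (PySem.Int.mod m d = 0 ∧ d * d ≤ m))

-- the cofactor part still to be collected from index i on (in order of the small divisor)
def pvBmid (m i : Int) : List Int :=
  ((PySem.List.pyRange i (m + 1)).filter (fun d => decide (PySem.Int.mod m d = 0 ∧ d * d < m))).map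
    (fun d => PySem.Int.floordiv m d)

theorem pv_sq_mono {i d : Int} (h1 : 1 ≤ i) (h2 : i ≤ d) : i * i ≤ d * d := by nlinarith

theorem pvAmid_nil {m i : Int} (h : ¬ i * i ≤ m) (h1 : 1 ≤ i) : pvAmid m i = [] := by
  apply List.filter_eq_nil_iff.mpr
  intro d hd
  have := PySem.List.mem_pyRange_one.mp hd
  have := pv_sq_mono h1 this.1
  simp only [decide_eq_true_eq, not_and]
  intro _; omega

theorem pvBmid_nil {m i : Int} (h : ¬ i * i ≤ m) (h1 : 1 ≤ i) : pvBmid m i = [] := by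
  unfold pvBmid
  rw [List.filter_eq_nil_iff.mpr, List.map_nil]
  intro d hd
  have := PySem.List.mem_pyRange_one.mp hd
  have := pv_sq_mono h1 this.1
  simp only [decide_eq_true_eq, not_and]
  intro _; omega

theorem pvDivLoop_eq (m : Int) (hm : 0 < m) :
    ∀ (k : Nat) (i : Int) (small large : List Int), 1 ≤ i → (m + 1 - i).toNat ≤ k →
      pvDivLoop m i small large = small ++ pvAmid m i ++ (large ++ pvBmid m i).reverse := by
  intro k
  induction k with
  | zero =>
    intro i small large h1 hk
    have him : m < i := by omega
    have : ¬ i * i ≤ m := by nlinarith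
    rw [pvDivLoop, dif_neg this, pvAmid_nil this h1, pvBmid_nil this h1]
    simp
  | succ k ih =>
    intro i small large h1 hk
    by_cases hle : i * i ≤ m
    · have him : i ≤ m := le_trans (by nlinarith) hle
      have hcons : PySem.List.pyRange i (m + 1) = i :: PySem.List.pyRange (i + 1) (m + 1) :=
        PySem.List.pyRange_one_cons (by omega)
      have hfuel : (m + 1 - (i + 1)).toNat ≤ k := by omega
      rw [pvDivLoop, dif_pos hle]
      by_cases hdvd : PySem.Int.mod m i = 0
      · have hidvd : i ∣ m := (PySem.Int.mod_eq_zero_iff_dvd m i).mp hdvd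
        set q := PySem.Int.floordiv m i with hq
        have hmq : m = i * q := by
          rw [hq, PySem.Int.floordiv_eq_ediv_of_pos (by omega)]
          exact (Int.ediv_mul_cancel hidvd).symm.trans (mul_comm _ _)
        by_cases hiq : i = q
        · -- i * i = m : append i to small, skip large
          have hsq : i * i = m := by rw [hmq, ← hiq]
          have hAm : pvAmid m i = i :: pvAmid m (i + 1) := by
            unfold pvAmid; rw [hcons, List.filter_cons_of_pos (by simp [hdvd, hle])]
          have hBm : pvBmid m i = pvBmid m (i + 1) := by
            unfold pvBmid
            rw [hcons, List.filter_cons_of_neg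
              (by simp only [decide_eq_true_eq, not_and]; intro _; omega)]
          rw [if_pos hdvd]
          simp only [if_neg (not_not_intro hiq)]
          rw [ih (i + 1) (small ++ [i]) large (by omega) hfuel, hAm, hBm]
          simp
        · -- i * i < m : append i to small and q to large
          have hslt : i * i < m := by
            rcases lt_or_eq_of_le hle with h | h
            · exact h
            · exact absurd (by nlinarith [hmq] : i = q) hiq
          have hAm : pvAmid m i = i :: pvAmid m (i + 1) := by
            unfold pvAmid; rw [hcons, List.filter_cons_of_pos (by simp [hdvd, hle])]
          have hBm : pvBmid m i = q :: pvBmid m (i + 1) := by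
            unfold pvBmid
            rw [hcons, List.filter_cons_of_pos (by simp [hdvd, hslt]), List.map_cons, hq]
          rw [if_pos hdvd]
          simp only [if_pos hiq]
          rw [ih (i + 1) (small ++ [i]) (large ++ [q]) (by omega) hfuel, hAm, hBm]
          simp
      · have hAm : pvAmid m i = pvAmid m (i + 1) := by
          unfold pvAmid; rw [hcons, List.filter_cons_of_neg (by simp [hdvd])]
        have hBm : pvBmid m i = pvBmid m (i + 1) := by
          unfold pvBmid; rw [hcons, List.filter_cons_of_neg (by simp [hdvd])]
        rw [if_neg hdvd, ih (i + 1) small large (by omega) hfuel, hAm, hBm]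
    · rw [pvDivLoop, dif_neg hle, pvAmid_nil hle h1, pvBmid_nil hle h1]
      simp

-- characterisation: pvDivisors m is the increasing list of all divisors of m
theorem pvDivisors_eq (m : Int) (hm : 0 < m) :
    pvDivisors m =
      (PySem.List.pyRange 1 (m + 1)).filter (fun d => decide (PySem.Int.mod m d = 0)) := by
  have hloop := pvDivLoop_eq m hm (m + 1 - 1).toNat 1 [] [] le_rfl le_rfl
  unfold pvDivisors
  rw [hloop]
  simp only [List.nil_append]
  -- both sides: strictly increasing lists with the same members
  set F := (PySem.List.pyRange 1 (m + 1)).filter (fun d => decide (PySem.Int.mod m d = 0)) with hF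
  have hmemF : ∀ x, x ∈ F ↔ (x ∣ m ∧ 1 ≤ x ∧ x ≤ m) := by
    intro x
    simp only [hF, List.mem_filter, PySem.List.mem_pyRange_one, decide_eq_true_eq,
      PySem.Int.mod_eq_zero_iff_dvd]
    constructor
    · rintro ⟨⟨h1, h2⟩, h3⟩; exact ⟨h3, h1, by omega⟩
    · rintro ⟨h1, h2, h3⟩; exact ⟨⟨h2, by omega⟩, h1⟩
  have hmemRHS : ∀ x, x ∈ pvAmid m 1 ++ (pvBmid m 1).reverse ↔ (x ∣ m ∧ 1 ≤ x ∧ x ≤ m) := by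
    intro x
    simp only [List.mem_append, List.mem_reverse, pvAmid, pvBmid, List.mem_map,
      List.mem_filter, PySem.List.mem_pyRange_one, decide_eq_true_eq,
      PySem.Int.mod_eq_zero_iff_dvd]
    constructor
    · rintro (⟨⟨h1, h2⟩, h3, h4⟩ | ⟨d, ⟨⟨hd1, hd2⟩, hd3, hd4⟩, hdx⟩)
      · exact ⟨h3, h1, by omega⟩
      · have hdm : m = d * PySem.Int.floordiv m d := by
          rw [PySem.Int.floordiv_eq_ediv_of_pos (by omega)]
          exact (Int.ediv_mul_cancel hd3).symm.trans (mul_comm _ _)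
        refine ⟨⟨d, by rw [← hdx, mul_comm]; exact hdm⟩, ?_, ?_⟩
        · rw [← hdx] at *; nlinarith
        · rw [← hdx] at *; nlinarith
    · rintro ⟨hdvd, h1, h2⟩
      by_cases hx : x * x ≤ m
      · exact Or.inl ⟨⟨h1, by omega⟩, hdvd, hx⟩
      · right
        obtain ⟨d, hd⟩ := hdvd
        have hd1 : 1 ≤ d := by nlinarith
        have hdm : d ≤ m := by nlinarith
        have hddvd : d ∣ m := ⟨x, by linarith [hd]⟩
        have hdd : d * d < m := by nlinarith
        refine ⟨d, ⟨⟨hd1, by omega⟩, hddvd, hdd⟩, ?_⟩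
        rw [PySem.Int.floordiv_eq_ediv_of_pos (by omega), hd,
          Int.mul_ediv_cancel _ (show d ≠ 0 by omega)]
  -- strict sortedness of both sides
  have hFs : F.Pairwise (· < ·) :=
    List.Pairwise.filter _ (PySem.List.pairwise_lt_pyRange_one 1 (m + 1))
  have hAs : (pvAmid m 1).Pairwise (· < ·) :=
    List.Pairwise.filter _ (PySem.List.pairwise_lt_pyRange_one 1 (m + 1))
  have hBs : ((pvBmid m 1).reverse).Pairwise (· < ·) := by
    rw [List.pairwise_reverse]
    unfold pvBmid
    rw [List.pairwise_map]
    have hp : ((PySem.List.pyRange 1 (m + 1)).filter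
        (fun d => decide (PySem.Int.mod m d = 0 ∧ d * d < m))).Pairwise (· < ·) :=
      List.Pairwise.filter _ (PySem.List.pairwise_lt_pyRange_one 1 (m + 1))
    refine hp.imp_of_mem ?_
    intro a b ha hb hab
    simp only [List.mem_filter, PySem.List.mem_pyRange_one, decide_eq_true_eq,
      PySem.Int.mod_eq_zero_iff_dvd] at ha hb
    obtain ⟨⟨ha1, _⟩, hadvd, _⟩ := ha
    obtain ⟨⟨hb1, _⟩, hbdvd, _⟩ := hb
    have hma : m = a * PySem.Int.floordiv m a := by
      rw [PySem.Int.floordiv_eq_ediv_of_pos (by omega)]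
      exact (Int.ediv_mul_cancel hadvd).symm.trans (mul_comm _ _)
    have hmb : m = b * PySem.Int.floordiv m b := by
      rw [PySem.Int.floordiv_eq_ediv_of_pos (by omega)]
      exact (Int.ediv_mul_cancel hbdvd).symm.trans (mul_comm _ _)
    have hfb1 : 1 ≤ PySem.Int.floordiv m b := by nlinarith
    nlinarith
  have hRHSs : (pvAmid m 1 ++ (pvBmid m 1).reverse).Pairwise (· < ·) := by
    rw [List.pairwise_append]
    refine ⟨hAs, hBs, ?_⟩
    intro x hx y hy
    simp only [pvAmid, List.mem_filter, PySem.List.mem_pyRange_one, decide_eq_true_eq,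
      PySem.Int.mod_eq_zero_iff_dvd] at hx
    simp only [pvBmid, List.mem_reverse, List.mem_map, List.mem_filter,
      PySem.List.mem_pyRange_one, decide_eq_true_eq, PySem.Int.mod_eq_zero_iff_dvd] at hy
    obtain ⟨⟨hx1, _⟩, _, hxx⟩ := hx
    obtain ⟨d, ⟨⟨hd1, _⟩, hddvd, hdd⟩, hdy⟩ := hy
    have hdm : m = d * PySem.Int.floordiv m d := by
      rw [PySem.Int.floordiv_eq_ediv_of_pos (by omega)]
      exact (Int.ediv_mul_cancel hddvd).symm.trans (mul_comm _ _)
    have hy1 : d < PySem.Int.floordiv m d := by nlinarith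
    rw [← hdy]
    nlinarith
  -- two strictly increasing lists with the same members are equal
  have hperm : (pvAmid m 1 ++ (pvBmid m 1).reverse).Perm F := by
    rw [List.perm_ext_iff_of_nodup hRHSs.nodup hFs.nodup]
    intro x; rw [hmemRHS, hmemF]
  exact List.Perm.eq_of_pairwise (fun a b _ _ h1 h2 => le_antisymm h1 h2)
    (hRHSs.imp le_of_lt) (hFs.imp le_of_lt) hperm

-- ===== VERDICT =====
theorem generate_multiples_spec : Claim_equal_generate_multiples := by
  intro n _ hn
  have hn0 : (0 : Int) < n := hn
  unfold Spec_generate_multiples generate_multiples generate_multiples_alt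
  rw [PySem.List.foldl_ite_eq_foldl_filter (fun a => PySem.Int.mod n a = 0)]
  refine Eq.trans (PySem.List.foldl_congr_mem _ _ (fun results a =>
    results ++ (pvDivisors (PySem.Int.floordiv n a)).map (fun b =>
      [a, b, PySem.Int.floordiv (PySem.Int.floordiv n a) b])) _ ?_) ?_
  · intro acc a ha
    have ha' := List.mem_filter.mp ha
    have ha1 := (PySem.List.mem_pyRange_one.mp ha'.1).1
    have had : a ∣ n := (PySem.Int.mod_eq_zero_iff_dvd n a).mp (by simpa using ha'.2)
    have hna : n = a * PySem.Int.floordiv n a := by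
      rw [PySem.Int.floordiv_eq_ediv_of_pos (by omega)]
      exact (Int.ediv_mul_cancel had).symm.trans (mul_comm _ _)
    have hm0 : 0 < PySem.Int.floordiv n a := by nlinarith [hn0, hna]
    simp only []
    rw [PySem.List.foldl_append_ite (fun b => PySem.Int.mod (PySem.Int.floordiv n a) b = 0)
      (fun b => [a, b, PySem.Int.floordiv (PySem.Int.floordiv n a) b]),
      pvDivisors_eq (PySem.Int.floordiv n a) hm0]
  · rw [PySem.List.foldl_append_eq_flatMap, pvDivisors_eq n hn0]
    simp
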